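-- pv_equiv track=rewrite | github.com/sidneycadot/qrcodes | binary_codes.py | format_information_code_remainder
-- ===== SOURCE A (Python) =====
-- def format_information_code_remainder(data: int) -> int:
--
--     residual = 0b0000000000
--     rmask_hi = 0b1000000000
--     rmask_lo = 0b0111111111
--     genpoly  = 0b0100110111
--
--     dmask = 0b10000
--
--     while dmask != 0:
--
--         databit = (data & dmask) != 0
--         dmask >>= 1
--
--         residual_bit = (residual & rmask_hi) != 0
--         residual = (residual & rmask_lo) << 1
--
--         if databit ^ residual_bit:
--             residual ^= genpoly
--
--     return residual
-- ===== SOURCE B (Python) =====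
-- # Table lookup: only the low 5 bits of data matter, so precompute the 32 BCH(15,5)
-- # remainders once and index by data % 32.
-- _BCH_REMAINDER = [
--     0, 311, 622, 857, 491, 220, 901, 690, 982, 737, 440, 143, 573, 778, 83, 356,
--     667, 940, 245, 450, 880, 583, 286, 41, 333, 122, 803, 532, 166, 401, 712, 1023,
-- ]
--
-- def format_information_code_remainder(data: int) -> int:
--     return _BCH_REMAINDER[data % 32]
-- ===== Notes on version B (the rewrite author's own statement) =====
-- stated objective: simpler
-- what changed: Replaces the 5-iteration bit-serial BCH shift register with a precomputed 32-entry remainder table indexed by data % 32 (only the low 5 data bits matter).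
import Mathlib
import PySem

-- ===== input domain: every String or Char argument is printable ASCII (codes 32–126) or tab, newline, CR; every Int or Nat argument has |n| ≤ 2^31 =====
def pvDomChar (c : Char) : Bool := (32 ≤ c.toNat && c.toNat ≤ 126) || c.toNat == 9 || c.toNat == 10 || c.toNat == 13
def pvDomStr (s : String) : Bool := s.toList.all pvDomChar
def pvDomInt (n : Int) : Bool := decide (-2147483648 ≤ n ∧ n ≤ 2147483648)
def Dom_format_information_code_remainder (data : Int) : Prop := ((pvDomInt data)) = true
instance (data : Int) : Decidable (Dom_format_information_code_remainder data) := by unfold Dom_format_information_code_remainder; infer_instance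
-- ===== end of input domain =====

-- B replaces A's 15-step shift register by a precomputed 32-entry remainder table indexed by data % 32 (simpler, O(1) lookup).

-- ===== PORT A =====
-- while dmask != 0: …  — ported as fuel recursion (fuel 5 = the exact number of
-- iterations: dmask runs 16,8,4,2,1); each step is a literal transcription.
def fircLoop (data : Int) : Nat → Int → Int → Int
  | 0, _, residual => residual
  | fuel + 1, dmask, residual =>
    if dmask = 0 then residual
    else
      let databit : Bool := decide (PySem.Int.band data dmask ≠ 0)
      let dmask' := dmask >>> 1
      let residual_bit : Bool := decide (PySem.Int.band residual 512 ≠ 0)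
      let residual' := (PySem.Int.band residual 511) <<< 1
      let residual'' := if databit.xor residual_bit then PySem.Int.bxor residual' 311 else residual'
      fircLoop data fuel dmask' residual''

def format_information_code_remainder (data : Int) : Int :=
  fircLoop data 5 16 0

-- ===== PORT B =====
def pvTable : List Int :=
  [0, 311, 622, 857, 491, 220, 901, 690, 982, 737, 440, 143, 573, 778, 83, 356,
   667, 940, 245, 450, 880, 583, 286, 41, 333, 122, 803, 532, 166, 401, 712, 1023]

-- _BCH_REMAINDER[data % 32]; the index is always in range, so getD's default is never used
def format_information_code_remainder_alt (data : Int) : Int :=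
  (PySem.List.pyGet? pvTable (PySem.Int.mod data 32)).getD 0

-- ===== PRECONDITION & SPEC =====
def Spec_format_information_code_remainder (data : Int) (out : Int) : Prop := out = format_information_code_remainder_alt data
instance (data : Int) (out : Int) : Decidable (Spec_format_information_code_remainder data out) := by unfold Spec_format_information_code_remainder; infer_instance

-- ===== CLAIM (what is proved, stated in full; the proofs are below) =====
def Claim_equal_format_information_code_remainder : Prop := ∀ (data : Int), Dom_format_information_code_remainder data → Spec_format_information_code_remainder data (format_information_code_remainder data)

-- ===== LEMMAS AND PROOFS =====

-- band with a one-bit mask, characterised by floor-div/mod (omega-friendly)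
lemma band_bit16 (a : Int) : (PySem.Int.band a 16 ≠ 0) ↔ a / 16 % 2 = 1 := by
  unfold PySem.Int.band
  by_cases ha : 0 ≤ a
  · rw [if_pos ha, if_pos (by norm_num)]
    have h : ((16 : Int).toNat) = 2 ^ 4 := by decide
    rw [h, Nat.and_two_pow, Nat.testBit_eq_decide_div_mod_eq]
    norm_num
    omega
  · rw [if_neg ha, if_pos (by norm_num)]
    have h : ((16 : Int).toNat) = 2 ^ 4 := by decide
    rw [h, Nat.two_pow_and, Nat.testBit_eq_decide_div_mod_eq]
    norm_num
    by_cases hb : ((-a).toNat - 1) / 16 % 2 = 1 <;> (try simp [hb]) <;> omega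

lemma band_bit8 (a : Int) : (PySem.Int.band a 8 ≠ 0) ↔ a / 8 % 2 = 1 := by
  unfold PySem.Int.band
  by_cases ha : 0 ≤ a
  · rw [if_pos ha, if_pos (by norm_num)]
    have h : ((8 : Int).toNat) = 2 ^ 3 := by decide
    rw [h, Nat.and_two_pow, Nat.testBit_eq_decide_div_mod_eq]
    norm_num
    omega
  · rw [if_neg ha, if_pos (by norm_num)]
    have h : ((8 : Int).toNat) = 2 ^ 3 := by decide
    rw [h, Nat.two_pow_and, Nat.testBit_eq_decide_div_mod_eq]
    norm_num
    by_cases hb : ((-a).toNat - 1) / 8 % 2 = 1 <;> (try simp [hb]) <;> omega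

lemma band_bit4 (a : Int) : (PySem.Int.band a 4 ≠ 0) ↔ a / 4 % 2 = 1 := by
  unfold PySem.Int.band
  by_cases ha : 0 ≤ a
  · rw [if_pos ha, if_pos (by norm_num)]
    have h : ((4 : Int).toNat) = 2 ^ 2 := by decide
    rw [h, Nat.and_two_pow, Nat.testBit_eq_decide_div_mod_eq]
    norm_num
    omega
  · rw [if_neg ha, if_pos (by norm_num)]
    have h : ((4 : Int).toNat) = 2 ^ 2 := by decide
    rw [h, Nat.two_pow_and, Nat.testBit_eq_decide_div_mod_eq]
    norm_num
    by_cases hb : ((-a).toNat - 1) / 4 % 2 = 1 <;> (try simp [hb]) <;> omega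

lemma band_bit2 (a : Int) : (PySem.Int.band a 2 ≠ 0) ↔ a / 2 % 2 = 1 := by
  unfold PySem.Int.band
  by_cases ha : 0 ≤ a
  · rw [if_pos ha, if_pos (by norm_num)]
    have h : ((2 : Int).toNat) = 2 ^ 1 := by decide
    rw [h, Nat.and_two_pow, Nat.testBit_eq_decide_div_mod_eq]
    norm_num
    omega
  · rw [if_neg ha, if_pos (by norm_num)]
    have h : ((2 : Int).toNat) = 2 ^ 1 := by decide
    rw [h, Nat.two_pow_and, Nat.testBit_eq_decide_div_mod_eq]
    norm_num
    by_cases hb : ((-a).toNat - 1) / 2 % 2 = 1 <;> (try simp [hb]) <;> omega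

lemma band_bit1 (a : Int) : (PySem.Int.band a 1 ≠ 0) ↔ a / 1 % 2 = 1 := by
  unfold PySem.Int.band
  by_cases ha : 0 ≤ a
  · rw [if_pos ha, if_pos (by norm_num)]
    have h : ((1 : Int).toNat) = 2 ^ 0 := by decide
    rw [h, Nat.and_two_pow, Nat.testBit_eq_decide_div_mod_eq]
    norm_num
    omega
  · rw [if_neg ha, if_pos (by norm_num)]
    have h : ((1 : Int).toNat) = 2 ^ 0 := by decide
    rw [h, Nat.two_pow_and, Nat.testBit_eq_decide_div_mod_eq]
    norm_num
    by_cases hb : ((-a).toNat - 1) % 2 = 1 <;> (try simp [hb]) <;> omega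

-- data and data % 32 give the same data-bit test for every mask the loop reaches
lemma bits_eq (data : Int) (dm : Int) (hdm : dm ∈ ([16, 8, 4, 2, 1, 0] : List Int)) :
    decide (PySem.Int.band data dm ≠ 0) = decide (PySem.Int.band (data % 32) dm ≠ 0) := by
  have hr : data % 32 = data - 32 * (data / 32) := by omega
  fin_cases hdm
  · rw [decide_eq_decide, band_bit16 data, band_bit16 (data % 32)]; omega
  · rw [decide_eq_decide, band_bit8 data, band_bit8 (data % 32)]; omega
  · rw [decide_eq_decide, band_bit4 data, band_bit4 (data % 32)]; omega
  · rw [decide_eq_decide, band_bit2 data, band_bit2 (data % 32)]; omega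
  · rw [decide_eq_decide, band_bit1 data, band_bit1 (data % 32)]; omega
  · simp

lemma mask_closure (dm : Int) (h : dm ∈ ([16, 8, 4, 2, 1, 0] : List Int)) :
    dm >>> 1 ∈ ([16, 8, 4, 2, 1, 0] : List Int) := by
  fin_cases h <;> decide

lemma loop_congr (a b : Int)
    (h : ∀ dm ∈ ([16, 8, 4, 2, 1, 0] : List Int),
        decide (PySem.Int.band a dm ≠ 0) = decide (PySem.Int.band b dm ≠ 0)) :
    ∀ (fuel : Nat) (dmask res : Int), dmask ∈ ([16, 8, 4, 2, 1, 0] : List Int) →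
      fircLoop a fuel dmask res = fircLoop b fuel dmask res := by
  intro fuel
  induction fuel with
  | zero => intro dmask res _; rfl
  | succ n ih =>
    intro dmask res hmem
    simp only [fircLoop]
    by_cases h0 : dmask = 0
    · simp [h0]
    · simp only [if_neg h0, h dmask hmem]
      exact ih _ _ (mask_closure dmask hmem)

lemma loop_mod (data : Int) :
    fircLoop data 5 16 0 = fircLoop (data % 32) 5 16 0 :=
  loop_congr data (data % 32) (fun dm hdm => bits_eq data dm hdm) 5 16 0 (by decide)

lemma mod_fmod (data : Int) : PySem.Int.mod data 32 = data % 32 := by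
  unfold PySem.Int.mod
  rw [Int.fmod_eq_emod]
  simp

lemma table_eval (r : Int) (h0 : 0 ≤ r) (h32 : r < 32) :
    fircLoop r 5 16 0 = (PySem.List.pyGet? pvTable (PySem.Int.mod r 32)).getD 0 := by
  interval_cases r <;> decide

-- ===== VERDICT (by name: the statement is the Claim_ definition above) =====
theorem format_information_code_remainder_spec : Claim_equal_format_information_code_remainder := by
  intro data _
  unfold Spec_format_information_code_remainder
  unfold format_information_code_remainder format_information_code_remainder_alt
  rw [loop_mod data, mod_fmod data]
  have h0 : 0 ≤ data % 32 := by omega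
  have h32 : data % 32 < 32 := by omega
  rw [table_eval (data % 32) h0 h32, mod_fmod (data % 32)]
  have : data % 32 % 32 = data % 32 := by omega
  rw [this]
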